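-- pv_equiv track=rewrite | github.com/movidius/volumetric_accelerator_toolkit | binutils.py | sparse_indexes
-- ===== SOURCE A (Python) =====
-- def sparse_indexes(coord, depth):
--     """Generate sparse indexes from coordinate."""
--     indexes = [0] * depth
--     x = coord[0]
--     y = coord[1]
--     z = coord[2]
--
--     for i in range(depth):
--         divx, modx = divmod(x, 4)
--         divy, mody = divmod(y, 4)
--         divz, modz = divmod(z, 4)
--         index = modx + (mody * 4) + (modz * 16)
--         level = (depth - i) - 1
--         indexes[level] = index
--
--         x = divx
--         y = divy
--         z = divz
--
--     return indexes
-- ===== SOURCE B (Python) =====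
-- def sparse_indexes(coord, depth):
--     """Generate sparse indexes from coordinate."""
--     x, y, z = coord[0], coord[1], coord[2]
--     # number of low levels that carry information: smallest t with -4**t <= c < 4**t for all coords
--     p, t = 1, 0
--     while t < depth and (x >= p or y >= p or z >= p or x < -p or y < -p or z < -p):
--         p *= 4
--         t += 1
--     # every level above t yields the constant sign digit
--     lead = (0 if x >= 0 else 3) + (0 if y >= 0 else 3) * 4 + (0 if z >= 0 else 3) * 16
--     indexes = [lead] * (depth - t)
--     for _ in range(t):
--         p //= 4
--         indexes.append((x // p) % 4 + ((y // p) % 4) * 4 + ((z // p) % 4) * 16)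
--     return indexes
-- ===== Notes on version B (the rewrite author's own statement) =====
-- stated objective: faster
-- what changed: Instead of A's per-level running divmod chain filling the output back-to-front, B finds t, the number of low levels that carry information, emits the constant sign digit for all depth-t higher levels in one list-repeat, and computes only the t low digits directly from the original coordinates.
import Mathlib
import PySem

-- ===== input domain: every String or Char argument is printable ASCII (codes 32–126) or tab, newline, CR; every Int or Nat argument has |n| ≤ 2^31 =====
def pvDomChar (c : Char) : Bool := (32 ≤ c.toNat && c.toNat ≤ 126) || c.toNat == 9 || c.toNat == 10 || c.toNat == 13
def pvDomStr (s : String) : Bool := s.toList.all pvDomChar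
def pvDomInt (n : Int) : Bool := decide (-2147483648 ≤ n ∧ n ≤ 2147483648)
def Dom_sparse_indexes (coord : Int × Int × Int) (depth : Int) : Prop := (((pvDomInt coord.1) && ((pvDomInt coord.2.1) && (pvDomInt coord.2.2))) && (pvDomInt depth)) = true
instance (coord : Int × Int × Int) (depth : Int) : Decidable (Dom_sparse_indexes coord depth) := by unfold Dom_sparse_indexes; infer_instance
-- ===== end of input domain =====

-- B replaces A's per-level running-divmod chain by: find t, the number of low levels that carry
-- information, emit the constant sign digit for all higher levels at once, and compute only the
-- t low digits directly from the original coordinates; objective: faster (constant-factor on deep trees).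

-- ===== PORT A =====
-- one loop iteration of A: running divmods, write at indexes[(depth - i) - 1]
def sparse_indexes_step (depth : Int) (s : List Int × Int × Int × Int) (i : Int) :
    List Int × Int × Int × Int :=
  let indexes := s.1
  let x := s.2.1
  let y := s.2.2.1
  let z := s.2.2.2
  let divx := PySem.Int.floordiv x 4
  let modx := PySem.Int.mod x 4
  let divy := PySem.Int.floordiv y 4
  let mody := PySem.Int.mod y 4
  let divz := PySem.Int.floordiv z 4
  let modz := PySem.Int.mod z 4
  let index := modx + mody * 4 + modz * 16
  let level := (depth - i) - 1
  (indexes.set level.toNat index, divx, divy, divz)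

def sparse_indexes (coord : Int × Int × Int) (depth : Int) : List Int :=
  let indexes : List Int := List.replicate depth.toNat 0   -- [0] * depth
  let st := (PySem.List.pyRange 0 depth 1).foldl (sparse_indexes_step depth)
    (indexes, coord.1, coord.2.1, coord.2.2)
  st.1

-- ===== PORT B =====
-- the 'while' loop of B: grow p = 4**t until every coordinate fits in (-p, p) or t reaches depth
def sparse_indexes_alt_grow (x y z depth : Int) (p t : Int) : Int × Int :=
  if h : t < depth ∧ (x ≥ p ∨ y ≥ p ∨ z ≥ p ∨ x < -p ∨ y < -p ∨ z < -p) then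
    sparse_indexes_alt_grow x y z depth (p * 4) (t + 1)
  else (p, t)
termination_by (depth - t).toNat
decreasing_by omega

-- one iteration of B's tail loop: p //= 4, append the digit at that power
def sparse_indexes_alt_step (x y z : Int) (s : List Int × Int) (_i : Int) : List Int × Int :=
  let p := PySem.Int.floordiv s.2 4
  (s.1 ++ [PySem.Int.mod (PySem.Int.floordiv x p) 4
    + PySem.Int.mod (PySem.Int.floordiv y p) 4 * 4
    + PySem.Int.mod (PySem.Int.floordiv z p) 4 * 16], p)

def sparse_indexes_alt (coord : Int × Int × Int) (depth : Int) : List Int :=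
  let x := coord.1
  let y := coord.2.1
  let z := coord.2.2
  let r := sparse_indexes_alt_grow x y z depth 1 0
  let lead := (if 0 ≤ x then (0:Int) else 3) + (if 0 ≤ y then (0:Int) else 3) * 4
    + (if 0 ≤ z then (0:Int) else 3) * 16
  -- [lead] * (depth - t), then t low digits appended, halving p each time
  let st := (PySem.List.pyRange 0 r.2 1).foldl (sparse_indexes_alt_step x y z)
    (List.replicate (depth - r.2).toNat lead, r.1)
  st.1

-- ===== PRECONDITION & SPEC =====
def Spec_sparse_indexes (coord : Int × Int × Int) (depth : Int) (out : List Int) : Prop := out = sparse_indexes_alt coord depth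
instance (coord : Int × Int × Int) (depth : Int) (out : List Int) : Decidable (Spec_sparse_indexes coord depth out) := by unfold Spec_sparse_indexes; infer_instance

-- ===== CLAIM (what is proved, stated in full; the proofs are below) =====
def Claim_equal_sparse_indexes : Prop := ∀ (coord : Int × Int × Int) (depth : Int), Dom_sparse_indexes coord depth → Spec_sparse_indexes coord depth (sparse_indexes coord depth)

-- ===== LEMMAS AND PROOFS =====

-- the interleaved digit at base-4 position k
def pvDig (k : Nat) (x y z : Int) : Int :=
  PySem.Int.mod (PySem.Int.floordiv x (4 ^ k)) 4
    + PySem.Int.mod (PySem.Int.floordiv y (4 ^ k)) 4 * 4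
    + PySem.Int.mod (PySem.Int.floordiv z (4 ^ k)) 4 * 16

lemma floordiv_four_pow (x : Int) (k : Nat) :
    PySem.Int.floordiv (PySem.Int.floordiv x 4) (4 ^ k) = PySem.Int.floordiv x (4 ^ (k + 1)) := by
  rw [PySem.Int.floordiv_eq_ediv_of_pos (a := x) (by positivity),
      PySem.Int.floordiv_eq_ediv_of_pos (by positivity),
      PySem.Int.floordiv_eq_ediv_of_pos (by positivity),
      Int.ediv_ediv_of_nonneg (by norm_num)]
  ring_nf

lemma pvDig_succ (k : Nat) (x y z : Int) :
    pvDig (k + 1) x y z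
      = pvDig k (PySem.Int.floordiv x 4) (PySem.Int.floordiv y 4) (PySem.Int.floordiv z 4) := by
  simp only [pvDig, floordiv_four_pow]

lemma pvDig_zero (x y z : Int) :
    pvDig 0 x y z = PySem.Int.mod x 4 + PySem.Int.mod y 4 * 4 + PySem.Int.mod z 4 * 16 := by
  simp [pvDig]

-- A's loop, started with n iterations remaining at index s (so depth = s + n),
-- fills the first n slots with the digits of the current state, back to front.
lemma loopA (n : Nat) : ∀ (s x y z : Int) (suffix : List Int),
    ((PySem.List.pyRange s (s + n) 1).foldl (sparse_indexes_step (s + n))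
        (List.replicate n 0 ++ suffix, x, y, z)).1
      = (List.range n).map (fun j => pvDig (n - 1 - j) x y z) ++ suffix := by
  induction n with
  | zero =>
    intro s x y z suffix
    have h0 : PySem.List.pyRange s (s + ((0 : Nat) : Int)) 1 = [] :=
      PySem.List.pyRange_one_eq_nil (by simp)
    rw [h0]; simp
  | succ n ih =>
    intro s x y z suffix
    rw [PySem.List.pyRange_one_cons (by omega), List.foldl_cons]
    have hstep : sparse_indexes_step (s + (n + 1 : Nat))
        (List.replicate (n + 1) 0 ++ suffix, x, y, z) s
        = (List.replicate n 0 ++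
            ((PySem.Int.mod x 4 + PySem.Int.mod y 4 * 4 + PySem.Int.mod z 4 * 16) :: suffix),
           PySem.Int.floordiv x 4, PySem.Int.floordiv y 4, PySem.Int.floordiv z 4) := by
      simp only [sparse_indexes_step]
      have hlev : ((s + ((n : Int) + 1) - s) - 1).toNat = n := by omega
      rw [List.replicate_succ' (n := n)]
      push_cast
      rw [hlev, List.append_assoc, List.set_append]
      simp
    have harg : s + ((n : Nat) + 1 : Nat) = (s + 1) + (n : Nat) := by push_cast; ring
    rw [harg] at hstep ⊢
    rw [hstep, ih (s + 1) _ _ _ _]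
    rw [List.range_succ, List.map_append, List.append_assoc]
    congr 1
    · apply List.map_congr_left
      intro j hj
      have hj' : j < n := List.mem_range.mp hj
      have : n + 1 - 1 - j = (n - 1 - j) + 1 := by omega
      rw [this, pvDig_succ]
    · simp [pvDig_zero]

lemma A_eq (coord : Int × Int × Int) (depth : Int) :
    sparse_indexes coord depth
      = (List.range depth.toNat).map
          (fun j => pvDig (depth.toNat - 1 - j) coord.1 coord.2.1 coord.2.2) := by
  have key := loopA depth.toNat 0 coord.1 coord.2.1 coord.2.2 []
  simp only [zero_add, List.append_nil] at key
  by_cases h : depth ≤ 0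
  · have h0 : PySem.List.pyRange 0 depth 1 = [] := PySem.List.pyRange_one_eq_nil h
    simp [sparse_indexes, h0, Int.toNat_of_nonpos h]
  · have hd : ((depth.toNat : Nat) : Int) = depth := by omega
    rw [hd] at key
    simp only [sparse_indexes]
    exact key

-- ===== B-side lemmas =====

-- spec of the 'while' loop: it returns (4^t', t') with t' between t and max depth 0,
-- and on exit either t' = depth or every coordinate lies in [-4^t', 4^t')
lemma grow_spec (x y z depth : Int) : ∀ (p t : Int), p = 4 ^ t.toNat → 0 ≤ t → t ≤ max depth 0 →
    ∃ T : Int, sparse_indexes_alt_grow x y z depth p t = (4 ^ T.toNat, T) ∧ 0 ≤ T ∧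
      T ≤ max depth 0 ∧
      (depth ≤ T ∨ (x < 4 ^ T.toNat ∧ -(4 ^ T.toNat : Int) ≤ x ∧ y < 4 ^ T.toNat ∧
        -(4 ^ T.toNat : Int) ≤ y ∧ z < 4 ^ T.toNat ∧ -(4 ^ T.toNat : Int) ≤ z)) := by
  intro p t
  induction p, t using sparse_indexes_alt_grow.induct x y z depth with
  | case1 p t h ih =>
    intro hp ht htm
    rw [sparse_indexes_alt_grow, dif_pos h]
    apply ih
    · rw [hp]
      have : (t + 1).toNat = t.toNat + 1 := by omega
      rw [this, pow_succ]
    · omega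
    · omega
  | case2 p t h =>
    intro hp ht htm
    rw [sparse_indexes_alt_grow, dif_neg h]
    refine ⟨t, by rw [hp], ht, htm, ?_⟩
    by_cases hd : t < depth
    · right
      push Not at h
      have hc := h hd
      rw [hp] at hc
      omega
    · left; omega

-- high digits are the sign digit
lemma floordiv_high (x : Int) (t k : Nat) (htk : t ≤ k)
    (h1 : x < 4 ^ t) (h2 : -(4 ^ t : Int) ≤ x) :
    PySem.Int.mod (PySem.Int.floordiv x (4 ^ k)) 4 = if 0 ≤ x then 0 else 3 := by
  have hpk : (0:Int) < 4 ^ k := by positivity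
  have hmono : (4:Int) ^ t ≤ 4 ^ k := by
    exact_mod_cast pow_le_pow_right₀ (by norm_num : (1:Int) ≤ 4) htk
  by_cases hx : 0 ≤ x
  · have h0 : PySem.Int.floordiv x (4 ^ k) = 0 :=
      (PySem.Int.floordiv_eq_iff_of_pos hpk).mpr ⟨by omega, by omega⟩
    rw [h0, if_pos hx]
    decide
  · have h0 : PySem.Int.floordiv x (4 ^ k) = -1 :=
      (PySem.Int.floordiv_eq_iff_of_pos hpk).mpr ⟨by omega, by omega⟩
    rw [h0, if_neg hx]
    decide

lemma pow_succ_floordiv (n : Nat) :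
    PySem.Int.floordiv (4 ^ (n + 1) : Int) 4 = 4 ^ n := by
  rw [PySem.Int.floordiv_eq_ediv_of_pos (by norm_num), pow_succ,
    Int.mul_ediv_cancel _ (by norm_num)]

-- B's tail loop over any index list: appends the low digits, highest exponent first
lemma tail_loop (x y z : Int) : ∀ (l : List Int) (acc : List Int),
    (l.foldl (sparse_indexes_alt_step x y z) (acc, (4 ^ l.length : Int))).1
    = acc ++ (List.range l.length).map (fun j => pvDig (l.length - 1 - j) x y z) := by
  intro l
  induction l with
  | nil => intro acc; simp
  | cons a l ih =>
    intro acc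
    have hstep : sparse_indexes_alt_step x y z (acc, (4 ^ (a :: l).length : Int)) a
        = (acc ++ [pvDig l.length x y z], (4 ^ l.length : Int)) := by
      simp only [sparse_indexes_alt_step, List.length_cons, pow_succ_floordiv, pvDig]
    rw [List.foldl_cons, hstep, ih (acc ++ [pvDig l.length x y z])]
    rw [List.length_cons, List.range_succ_eq_map, List.map_cons, List.map_map,
      List.append_assoc]
    congr 2
    simp
    intro j hj
    congr 1
    omega

-- A's digit list splits into (n - t) sign digits followed by the t low digits
lemma split_map (x y z : Int) (n t : Nat) (ht : t ≤ n)
    (hx1 : x < 4 ^ t) (hx2 : -(4 ^ t : Int) ≤ x) (hy1 : y < 4 ^ t) (hy2 : -(4 ^ t : Int) ≤ y)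
    (hz1 : z < 4 ^ t) (hz2 : -(4 ^ t : Int) ≤ z) :
    (List.range n).map (fun j => pvDig (n - 1 - j) x y z)
      = List.replicate (n - t) ((if 0 ≤ x then (0:Int) else 3) + (if 0 ≤ y then (0:Int) else 3) * 4
          + (if 0 ≤ z then (0:Int) else 3) * 16)
        ++ (List.range t).map (fun j => pvDig (t - 1 - j) x y z) := by
  apply List.ext_getElem
  · simp; omega
  · intro i hi1 hi2
    simp only [List.length_map, List.length_range] at hi1
    simp only [List.getElem_map, List.getElem_range]
    by_cases hcase : i < n - t
    · rw [List.getElem_append_left (by simpa using hcase)]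
      simp only [List.getElem_replicate]
      have hk : t ≤ n - 1 - i := by omega
      simp only [pvDig, floordiv_high x t _ hk hx1 hx2, floordiv_high y t _ hk hy1 hy2,
        floordiv_high z t _ hk hz1 hz2]
    · rw [List.getElem_append_right (by simpa using hcase)]
      simp only [List.getElem_map, List.getElem_range, List.length_replicate]
      congr 1
      omega

-- ===== VERDICT (by name: the statement is the Claim_ definition above) =====
theorem sparse_indexes_spec : Claim_equal_sparse_indexes := by
  intro coord depth _
  unfold Spec_sparse_indexes
  obtain ⟨T, hgrow, hT0, hTm, hTalt⟩ :=
    grow_spec coord.1 coord.2.1 coord.2.2 depth 1 0 (by simp) le_rfl (by omega)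
  have hlen : (PySem.List.pyRange 0 T 1).length = T.toNat := by
    rw [PySem.List.length_pyRange_one]; omega
  have hkey := tail_loop coord.1 coord.2.1 coord.2.2 (PySem.List.pyRange 0 T 1)
    (List.replicate (depth - T).toNat ((if 0 ≤ coord.1 then (0:Int) else 3)
      + (if 0 ≤ coord.2.1 then (0:Int) else 3) * 4 + (if 0 ≤ coord.2.2 then (0:Int) else 3) * 16))
  rw [hlen] at hkey
  have halt : sparse_indexes_alt coord depth
      = List.replicate (depth - T).toNat ((if 0 ≤ coord.1 then (0:Int) else 3)
          + (if 0 ≤ coord.2.1 then (0:Int) else 3) * 4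
          + (if 0 ≤ coord.2.2 then (0:Int) else 3) * 16)
        ++ (List.range T.toNat).map (fun j => pvDig (T.toNat - 1 - j) coord.1 coord.2.1 coord.2.2) := by
    simp only [sparse_indexes_alt, hgrow]
    exact hkey
  rw [A_eq, halt]
  rcases hTalt with hdT | hbounds
  · -- t' reached depth (or depth ≤ 0 and t' = 0): no sign-digit prefix
    by_cases hd : depth ≤ 0
    · have hT : T = 0 := by omega
      simp [hT, Int.toNat_of_nonpos hd]
    · have hT : T = depth := by omega
      subst hT
      simp
  · -- all coordinates fit below 4^T: prefix of sign digits, then the T low digits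
    have htn : T.toNat ≤ depth.toNat := by omega
    have hrepl : (depth - T).toNat = depth.toNat - T.toNat := by omega
    rw [hrepl]
    exact split_map coord.1 coord.2.1 coord.2.2 depth.toNat T.toNat htn
      hbounds.1 hbounds.2.1 hbounds.2.2.1 hbounds.2.2.2.1 hbounds.2.2.2.2.1 hbounds.2.2.2.2.2
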